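-- pv_equiv track=rewrite | github.com/JJaakson/School-Work | Python MainCourse/ex03_idcode/idcode.py | get_birth_place
-- ===== SOURCE A (Python) =====
-- def get_birth_place(birth_number: int) -> str:
--     """
--     Find the place where the person was born.
--
--     Possible locations are following: Kuressaare, Tartu, Tallinn, Kohtla-Järve, Narva, Pärnu,
--     Paide, Rakvere, Valga, Viljandi, Võru and undefined. Lastly if the number is incorrect the function must return
--     the following 'Wrong input!'
--     :param birth_number: int
--     :return: str
--     """
--     locations = {
--         range(1, 11): "Kuressaare",
--         range(11, 21): "Tartu",
--         range(271, 371): "Tartu",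
--         range(21, 221): "Tallinn",
--         range(471, 491): "Tallinn",
--         range(221, 271): "Kohtla-Järve",
--         range(371, 421): "Narva",
--         range(421, 471): "Pärnu",
--         range(491, 521): "Paide",
--         range(521, 571): "Rakvere",
--         range(571, 601): "Valga",
--         range(601, 651): "Viljandi",
--         range(651, 711): "Võru",
--         range(711, 1000): "undefined"
--     }
--     for i in locations:
--         if birth_number in i:
--             return locations[i]
--     else:
--         return "Wrong input!"
-- ===== SOURCE B (Python) =====
-- import bisect
--
-- _BREAKPOINTS = [1, 11, 21, 221, 271, 371, 421, 471, 491, 521, 571, 601, 651, 711, 1000]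
-- _LABELS = ["Kuressaare", "Tartu", "Tallinn", "Kohtla-Järve", "Tartu", "Narva",
--            "Pärnu", "Tallinn", "Paide", "Rakvere", "Valga", "Viljandi", "Võru", "undefined"]
--
--
-- def get_birth_place(birth_number: int) -> str:
--     """Binary-search the sorted breakpoint table instead of scanning ranges."""
--     i = bisect.bisect_right(_BREAKPOINTS, birth_number)
--     if i == 0 or i >= len(_LABELS) + 1:
--         return "Wrong input!"
--     return _LABELS[i - 1]
-- ===== Notes on version B (the rewrite author's own statement) =====
-- stated objective: idiomatic
-- what changed: Replaces the linear scan over a dict of range objects by a bisect_right binary search on a sorted breakpoint list with a parallel label table.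
import Mathlib
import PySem

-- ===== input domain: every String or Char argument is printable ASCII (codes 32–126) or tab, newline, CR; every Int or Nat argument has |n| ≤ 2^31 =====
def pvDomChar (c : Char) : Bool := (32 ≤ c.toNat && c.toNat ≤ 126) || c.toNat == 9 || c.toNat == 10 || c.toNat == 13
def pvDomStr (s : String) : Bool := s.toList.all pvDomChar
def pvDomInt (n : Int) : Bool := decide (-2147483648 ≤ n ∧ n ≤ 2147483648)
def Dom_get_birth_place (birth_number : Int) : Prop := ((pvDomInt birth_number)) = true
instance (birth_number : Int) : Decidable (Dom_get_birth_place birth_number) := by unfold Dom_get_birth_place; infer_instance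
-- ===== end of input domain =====

set_option maxHeartbeats 1000000

-- B replaces A's linear scan over range objects by a bisect_right binary search on sorted breakpoints (idiomatic; same exact values).


-- ===== PORT A =====
-- A iterates the dict's ranges in insertion order; membership 'n in range(a,b)' is a ≤ n < b.
def pvLocations : List ((Int × Int) × String) :=
  [((1, 11), "Kuressaare"), ((11, 21), "Tartu"), ((271, 371), "Tartu"),
   ((21, 221), "Tallinn"), ((471, 491), "Tallinn"), ((221, 271), "Kohtla-Järve"),
   ((371, 421), "Narva"), ((421, 471), "Pärnu"), ((491, 521), "Paide"),
   ((521, 571), "Rakvere"), ((571, 601), "Valga"), ((601, 651), "Viljandi"),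
   ((651, 711), "Võru"), ((711, 1000), "undefined")]

-- the for-loop with its else-clause: first range containing the number wins
def pvScan (n : Int) : List ((Int × Int) × String) → String
  | [] => "Wrong input!"
  | ((lo, hi), name) :: rest => if lo ≤ n ∧ n < hi then name else pvScan n rest

def get_birth_place (birth_number : Int) : String :=
  pvScan birth_number pvLocations


-- ===== PORT B =====
def pvBreakpoints : List Int := [1, 11, 21, 221, 271, 371, 421, 471, 491, 521, 571, 601, 651, 711, 1000]
def pvLabels : List String :=
  ["Kuressaare", "Tartu", "Tallinn", "Kohtla-Järve", "Tartu", "Narva",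
   "Pärnu", "Tallinn", "Paide", "Rakvere", "Valga", "Viljandi", "Võru", "undefined"]

-- bisect.bisect_right, fuel-indexed halving loop (fuel = list length suffices)
def pvBisectRight (xs : List Int) (x : Int) : Nat → Nat → Nat → Nat
  | 0, lo, _ => lo
  | fuel + 1, lo, hi =>
    if lo < hi then
      let mid := (lo + hi) / 2
      if x < xs.getD mid 0 then pvBisectRight xs x fuel lo mid
      else pvBisectRight xs x fuel (mid + 1) hi
    else lo

def get_birth_place_alt (birth_number : Int) : String :=
  let i := pvBisectRight pvBreakpoints birth_number pvBreakpoints.length 0 pvBreakpoints.length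
  if i = 0 ∨ pvLabels.length + 1 ≤ i then "Wrong input!"
  else pvLabels.getD (i - 1) ""


-- ===== PRECONDITION & SPEC =====
def Spec_get_birth_place (birth_number : Int) (out : String) : Prop := out = get_birth_place_alt birth_number
instance (birth_number : Int) (out : String) : Decidable (Spec_get_birth_place birth_number out) := by unfold Spec_get_birth_place; infer_instance

-- ===== CLAIM (what is proved, stated in full; the proofs are below) =====
def Claim_equal_get_birth_place : Prop := ∀ (birth_number : Int), Dom_get_birth_place birth_number → Spec_get_birth_place birth_number (get_birth_place birth_number)

-- ===== LEMMAS AND PROOFS =====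

-- ===== VERDICT (by name: the statement is the Claim_ definition above) =====
-- pvBisectRight returns the unique separation point k of the comparisons with x
theorem pvBisect_run (xs : List Int) (x : Int) (k : Nat) :
    ∀ (fuel lo hi : Nat), hi - lo ≤ fuel → lo ≤ k → k ≤ hi →
    (∀ j, lo ≤ j → j < hi → (xs.getD j 0 ≤ x ↔ j < k)) →
    pvBisectRight xs x fuel lo hi = k := by
  intro fuel
  induction fuel with
  | zero => intro lo hi hf h1 h2 _; simp only [pvBisectRight]; omega
  | succ f ih =>
    intro lo hi hf h1 h2 h
    simp only [pvBisectRight]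
    by_cases hlt : lo < hi
    · rw [if_pos hlt]
      by_cases hx : x < xs.getD ((lo + hi) / 2) 0
      · rw [if_pos hx]
        have hk : k ≤ (lo + hi) / 2 := by
          have := h ((lo + hi) / 2) (by omega) (by omega); omega
        exact ih lo ((lo + hi) / 2) (by omega) h1 hk
          (fun j hj1 hj2 => h j hj1 (by omega))
      · rw [if_neg hx]
        have hk : (lo + hi) / 2 < k := by
          have := h ((lo + hi) / 2) (by omega) (by omega); omega
        exact ih ((lo + hi) / 2 + 1) hi (by omega) (by omega) h2
          (fun j hj1 hj2 => h j (by omega) hj2)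
    · rw [if_neg hlt]; omega

theorem pvBisect_eval (n : Int) (k : Nat)
    (h : ∀ j, 0 ≤ j → j < 15 → (pvBreakpoints.getD j 0 ≤ n ↔ j < k)) (hk1 : k ≤ 15) :
    pvBisectRight pvBreakpoints n 15 0 15 = k := by
  exact pvBisect_run pvBreakpoints n k 15 0 15 (by omega) (by omega) hk1 (fun j _ hj => h j (by omega) hj)

theorem fifteen : pvBreakpoints.length = 15 := rfl
theorem fourteen : pvLabels.length = 14 := rfl

theorem get_birth_place_spec : Claim_equal_get_birth_place := by
  intro n _
  unfold Spec_get_birth_place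
  rcases (by omega : (n < 1) ∨ (1 ≤ n ∧ n < 11) ∨ (11 ≤ n ∧ n < 21) ∨ (21 ≤ n ∧ n < 221) ∨ (221 ≤ n ∧ n < 271) ∨ (271 ≤ n ∧ n < 371) ∨ (371 ≤ n ∧ n < 421) ∨ (421 ≤ n ∧ n < 471) ∨ (471 ≤ n ∧ n < 491) ∨ (491 ≤ n ∧ n < 521) ∨ (521 ≤ n ∧ n < 571) ∨ (571 ≤ n ∧ n < 601) ∨ (601 ≤ n ∧ n < 651) ∨ (651 ≤ n ∧ n < 711) ∨ (711 ≤ n ∧ n < 1000) ∨ (1000 ≤ n)) with h|h|h|h|h|h|h|h|h|h|h|h|h|h|h|h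
  · have hb := pvBisect_eval n 0 (by intro j h1 h2; interval_cases j <;> simp [pvBreakpoints] <;> omega) (by omega)
    have e1 : get_birth_place_alt n = "Wrong input!" := by
      unfold get_birth_place_alt
      rw [fifteen, fourteen, hb]
      norm_num [pvLabels]
    have e2 : get_birth_place n = "Wrong input!" := by
      unfold get_birth_place pvLocations
      simp only [pvScan]
      rw [if_neg (by omega), if_neg (by omega), if_neg (by omega), if_neg (by omega), if_neg (by omega), if_neg (by omega), if_neg (by omega), if_neg (by omega), if_neg (by omega), if_neg (by omega), if_neg (by omega), if_neg (by omega), if_neg (by omega), if_neg (by omega)]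
    rw [e1, e2]
  · have hb := pvBisect_eval n 1 (by intro j h1 h2; interval_cases j <;> simp [pvBreakpoints] <;> omega) (by omega)
    have e1 : get_birth_place_alt n = "Kuressaare" := by
      unfold get_birth_place_alt
      rw [fifteen, fourteen, hb]
      norm_num [pvLabels]
    have e2 : get_birth_place n = "Kuressaare" := by
      unfold get_birth_place pvLocations
      simp only [pvScan]
      rw [if_pos (by omega)]
    rw [e1, e2]
  · have hb := pvBisect_eval n 2 (by intro j h1 h2; interval_cases j <;> simp [pvBreakpoints] <;> omega) (by omega)
    have e1 : get_birth_place_alt n = "Tartu" := by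
      unfold get_birth_place_alt
      rw [fifteen, fourteen, hb]
      norm_num [pvLabels]
    have e2 : get_birth_place n = "Tartu" := by
      unfold get_birth_place pvLocations
      simp only [pvScan]
      rw [if_neg (by omega), if_pos (by omega)]
    rw [e1, e2]
  · have hb := pvBisect_eval n 3 (by intro j h1 h2; interval_cases j <;> simp [pvBreakpoints] <;> omega) (by omega)
    have e1 : get_birth_place_alt n = "Tallinn" := by
      unfold get_birth_place_alt
      rw [fifteen, fourteen, hb]
      norm_num [pvLabels]
    have e2 : get_birth_place n = "Tallinn" := by
      unfold get_birth_place pvLocations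
      simp only [pvScan]
      rw [if_neg (by omega), if_neg (by omega), if_neg (by omega), if_pos (by omega)]
    rw [e1, e2]
  · have hb := pvBisect_eval n 4 (by intro j h1 h2; interval_cases j <;> simp [pvBreakpoints] <;> omega) (by omega)
    have e1 : get_birth_place_alt n = "Kohtla-Järve" := by
      unfold get_birth_place_alt
      rw [fifteen, fourteen, hb]
      norm_num [pvLabels]
    have e2 : get_birth_place n = "Kohtla-Järve" := by
      unfold get_birth_place pvLocations
      simp only [pvScan]
      rw [if_neg (by omega), if_neg (by omega), if_neg (by omega), if_neg (by omega), if_neg (by omega), if_pos (by omega)]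
    rw [e1, e2]
  · have hb := pvBisect_eval n 5 (by intro j h1 h2; interval_cases j <;> simp [pvBreakpoints] <;> omega) (by omega)
    have e1 : get_birth_place_alt n = "Tartu" := by
      unfold get_birth_place_alt
      rw [fifteen, fourteen, hb]
      norm_num [pvLabels]
    have e2 : get_birth_place n = "Tartu" := by
      unfold get_birth_place pvLocations
      simp only [pvScan]
      rw [if_neg (by omega), if_neg (by omega), if_pos (by omega)]
    rw [e1, e2]
  · have hb := pvBisect_eval n 6 (by intro j h1 h2; interval_cases j <;> simp [pvBreakpoints] <;> omega) (by omega)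
    have e1 : get_birth_place_alt n = "Narva" := by
      unfold get_birth_place_alt
      rw [fifteen, fourteen, hb]
      norm_num [pvLabels]
    have e2 : get_birth_place n = "Narva" := by
      unfold get_birth_place pvLocations
      simp only [pvScan]
      rw [if_neg (by omega), if_neg (by omega), if_neg (by omega), if_neg (by omega), if_neg (by omega), if_neg (by omega), if_pos (by omega)]
    rw [e1, e2]
  · have hb := pvBisect_eval n 7 (by intro j h1 h2; interval_cases j <;> simp [pvBreakpoints] <;> omega) (by omega)
    have e1 : get_birth_place_alt n = "Pärnu" := by
      unfold get_birth_place_alt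
      rw [fifteen, fourteen, hb]
      norm_num [pvLabels]
    have e2 : get_birth_place n = "Pärnu" := by
      unfold get_birth_place pvLocations
      simp only [pvScan]
      rw [if_neg (by omega), if_neg (by omega), if_neg (by omega), if_neg (by omega), if_neg (by omega), if_neg (by omega), if_neg (by omega), if_pos (by omega)]
    rw [e1, e2]
  · have hb := pvBisect_eval n 8 (by intro j h1 h2; interval_cases j <;> simp [pvBreakpoints] <;> omega) (by omega)
    have e1 : get_birth_place_alt n = "Tallinn" := by
      unfold get_birth_place_alt
      rw [fifteen, fourteen, hb]
      norm_num [pvLabels]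
    have e2 : get_birth_place n = "Tallinn" := by
      unfold get_birth_place pvLocations
      simp only [pvScan]
      rw [if_neg (by omega), if_neg (by omega), if_neg (by omega), if_neg (by omega), if_pos (by omega)]
    rw [e1, e2]
  · have hb := pvBisect_eval n 9 (by intro j h1 h2; interval_cases j <;> simp [pvBreakpoints] <;> omega) (by omega)
    have e1 : get_birth_place_alt n = "Paide" := by
      unfold get_birth_place_alt
      rw [fifteen, fourteen, hb]
      norm_num [pvLabels]
    have e2 : get_birth_place n = "Paide" := by
      unfold get_birth_place pvLocations
      simp only [pvScan]
      rw [if_neg (by omega), if_neg (by omega), if_neg (by omega), if_neg (by omega), if_neg (by omega), if_neg (by omega), if_neg (by omega), if_neg (by omega), if_pos (by omega)]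
    rw [e1, e2]
  · have hb := pvBisect_eval n 10 (by intro j h1 h2; interval_cases j <;> simp [pvBreakpoints] <;> omega) (by omega)
    have e1 : get_birth_place_alt n = "Rakvere" := by
      unfold get_birth_place_alt
      rw [fifteen, fourteen, hb]
      norm_num [pvLabels]
    have e2 : get_birth_place n = "Rakvere" := by
      unfold get_birth_place pvLocations
      simp only [pvScan]
      rw [if_neg (by omega), if_neg (by omega), if_neg (by omega), if_neg (by omega), if_neg (by omega), if_neg (by omega), if_neg (by omega), if_neg (by omega), if_neg (by omega), if_pos (by omega)]
    rw [e1, e2]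
  · have hb := pvBisect_eval n 11 (by intro j h1 h2; interval_cases j <;> simp [pvBreakpoints] <;> omega) (by omega)
    have e1 : get_birth_place_alt n = "Valga" := by
      unfold get_birth_place_alt
      rw [fifteen, fourteen, hb]
      norm_num [pvLabels]
    have e2 : get_birth_place n = "Valga" := by
      unfold get_birth_place pvLocations
      simp only [pvScan]
      rw [if_neg (by omega), if_neg (by omega), if_neg (by omega), if_neg (by omega), if_neg (by omega), if_neg (by omega), if_neg (by omega), if_neg (by omega), if_neg (by omega), if_neg (by omega), if_pos (by omega)]
    rw [e1, e2]
  · have hb := pvBisect_eval n 12 (by intro j h1 h2; interval_cases j <;> simp [pvBreakpoints] <;> omega) (by omega)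
    have e1 : get_birth_place_alt n = "Viljandi" := by
      unfold get_birth_place_alt
      rw [fifteen, fourteen, hb]
      norm_num [pvLabels]
    have e2 : get_birth_place n = "Viljandi" := by
      unfold get_birth_place pvLocations
      simp only [pvScan]
      rw [if_neg (by omega), if_neg (by omega), if_neg (by omega), if_neg (by omega), if_neg (by omega), if_neg (by omega), if_neg (by omega), if_neg (by omega), if_neg (by omega), if_neg (by omega), if_neg (by omega), if_pos (by omega)]
    rw [e1, e2]
  · have hb := pvBisect_eval n 13 (by intro j h1 h2; interval_cases j <;> simp [pvBreakpoints] <;> omega) (by omega)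
    have e1 : get_birth_place_alt n = "Võru" := by
      unfold get_birth_place_alt
      rw [fifteen, fourteen, hb]
      norm_num [pvLabels]
    have e2 : get_birth_place n = "Võru" := by
      unfold get_birth_place pvLocations
      simp only [pvScan]
      rw [if_neg (by omega), if_neg (by omega), if_neg (by omega), if_neg (by omega), if_neg (by omega), if_neg (by omega), if_neg (by omega), if_neg (by omega), if_neg (by omega), if_neg (by omega), if_neg (by omega), if_neg (by omega), if_pos (by omega)]
    rw [e1, e2]
  · have hb := pvBisect_eval n 14 (by intro j h1 h2; interval_cases j <;> simp [pvBreakpoints] <;> omega) (by omega)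
    have e1 : get_birth_place_alt n = "undefined" := by
      unfold get_birth_place_alt
      rw [fifteen, fourteen, hb]
      norm_num [pvLabels]
    have e2 : get_birth_place n = "undefined" := by
      unfold get_birth_place pvLocations
      simp only [pvScan]
      rw [if_neg (by omega), if_neg (by omega), if_neg (by omega), if_neg (by omega), if_neg (by omega), if_neg (by omega), if_neg (by omega), if_neg (by omega), if_neg (by omega), if_neg (by omega), if_neg (by omega), if_neg (by omega), if_neg (by omega), if_pos (by omega)]
    rw [e1, e2]
  · have hb := pvBisect_eval n 15 (by intro j h1 h2; interval_cases j <;> simp [pvBreakpoints] <;> omega) (by omega)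
    have e1 : get_birth_place_alt n = "Wrong input!" := by
      unfold get_birth_place_alt
      rw [fifteen, fourteen, hb]
      norm_num [pvLabels]
    have e2 : get_birth_place n = "Wrong input!" := by
      unfold get_birth_place pvLocations
      simp only [pvScan]
      rw [if_neg (by omega), if_neg (by omega), if_neg (by omega), if_neg (by omega), if_neg (by omega), if_neg (by omega), if_neg (by omega), if_neg (by omega), if_neg (by omega), if_neg (by omega), if_neg (by omega), if_neg (by omega), if_neg (by omega), if_neg (by omega)]
    rw [e1, e2]
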